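-- pv_equiv track=rewrite | github.com/Metaheurist/Aquaduct | src/content/article_clean.py | _cut_at_rail
-- ===== SOURCE A (Python) =====
-- _FANDOM_RAIL_HEADERS: tuple[str, ...] = (
--     "fan feed",
--     "trending pages",
--     "popular pages",
--     "more stories",
--     "more pages",
--     "more categories",
--     "categories list",
--     "see more from this wiki",
--     "explore properties",
--     "follow us",
--     "advertise",
--     "media kit",
--     "contact us",
--     "terms of use",
--     "privacy policy",
--     "cookie settings",
--     "manage cookie preferences",
--     "do not sell or share my personal information",
--     "support fandom",
--     "fandom apps",
--     "report this ad",
--     "edit this article",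
--     "view source",
--     "view history",
--     "discuss this article",
--     "what links here",
--     "related changes",
--     "special pages",
--     "printable version",
--     "permanent link",
--     "page information",
--     "cite this page",
-- )
--
-- def _cut_at_rail(text: str) -> str:
--     """Truncate ``text`` at the first rail-header substring we recognize."""
--     if not text:
--         return ""
--     low = text.lower()
--     cut_at: int | None = None
--     for pat in _FANDOM_RAIL_HEADERS:
--         idx = low.find(pat)
--         if idx == -1:
--             continue
--         if cut_at is None or idx < cut_at:
--             cut_at = idx
--     return text if cut_at is None else text[:cut_at]
-- ===== SOURCE B (Python) =====
-- _FANDOM_RAIL_HEADERS: tuple[str, ...] = (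
--     "fan feed",
--     "trending pages",
--     "popular pages",
--     "more stories",
--     "more pages",
--     "more categories",
--     "categories list",
--     "see more from this wiki",
--     "explore properties",
--     "follow us",
--     "advertise",
--     "media kit",
--     "contact us",
--     "terms of use",
--     "privacy policy",
--     "cookie settings",
--     "manage cookie preferences",
--     "do not sell or share my personal information",
--     "support fandom",
--     "fandom apps",
--     "report this ad",
--     "edit this article",
--     "view source",
--     "view history",
--     "discuss this article",
--     "what links here",
--     "related changes",
--     "special pages",
--     "printable version",
--     "permanent link",
--     "page information",
--     "cite this page",
-- )
--
--
-- def _cut_at_rail(text: str) -> str: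
--     """Truncate ``text`` at the first rail-header substring we recognize."""
--     if not text:
--         return ""
--     low = text.lower()
--     for i in range(len(low)):
--         if any(low.startswith(pat, i) for pat in _FANDOM_RAIL_HEADERS):
--             return text[:i]
--     return text
-- ===== Notes on version B (the rewrite author's own statement) =====
-- stated objective: alternative
-- what changed: Replaced the per-pattern low.find scan with min tracking by a single left-to-right position scan that returns at the first index where any header matches (the leftmost-match view a regex alternation would take).
import Mathlib
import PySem

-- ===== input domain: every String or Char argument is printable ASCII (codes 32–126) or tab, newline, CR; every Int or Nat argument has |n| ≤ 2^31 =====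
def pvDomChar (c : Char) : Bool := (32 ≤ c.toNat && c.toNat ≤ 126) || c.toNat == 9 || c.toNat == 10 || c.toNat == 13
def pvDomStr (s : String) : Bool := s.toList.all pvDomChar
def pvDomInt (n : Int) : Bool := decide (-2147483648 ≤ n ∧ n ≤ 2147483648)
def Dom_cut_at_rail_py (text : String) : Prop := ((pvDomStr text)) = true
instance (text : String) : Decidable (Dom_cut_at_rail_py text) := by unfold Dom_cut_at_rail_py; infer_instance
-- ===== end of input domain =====

-- B replaces A's per-pattern find/min-tracking loop by a single left-to-right position scan
-- returning at the first index where any header matches (alternative decomposition, same cost).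

-- the module constant _FANDOM_RAIL_HEADERS
def pvHeaders : List String :=
  ["fan feed", "trending pages", "popular pages", "more stories", "more pages",
   "more categories", "categories list", "see more from this wiki", "explore properties",
   "follow us", "advertise", "media kit", "contact us", "terms of use", "privacy policy",
   "cookie settings", "manage cookie preferences",
   "do not sell or share my personal information", "support fandom", "fandom apps",
   "report this ad", "edit this article", "view source", "view history",
   "discuss this article", "what links here", "related changes", "special pages",
   "printable version", "permanent link", "page information", "cite this page"]

-- ===== PORT A =====
-- the body of A's for-loop (find, skip on -1, keep the minimum)
def pvStep (low : String) (cut : Option Int) (pat : String) : Option Int :=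
  let idx := PySem.Str.find low pat
  if idx = -1 then cut
  else
    match cut with
    | none => some idx
    | some c => if idx < c then some idx else some c

def cut_at_rail_py (text : String) : String :=
  if text = "" then ""
  else
    match pvHeaders.foldl (pvStep (PySem.Str.lower text)) none with
    | none => text
    | some c => PySem.Str.slice text none (some c)

-- ===== PORT B =====
-- Python: for i in range(len(low)): if any(low.startswith(pat, i) …): return text[:i]
-- 'low.startswith(pat, i)' for 0 ≤ i ≤ len(low) is exactly startswith of low[i:] (exact on that range).
def cut_at_rail_py_alt (text : String) : String :=
  if text = "" then ""
  else
    -- len(low) = number of code points = toList.length (exact)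
    match (List.range ((PySem.Str.lower text).toList.length)).find?
        (fun i => pvHeaders.any
          (fun pat => PySem.Chars.startswith ((PySem.Str.lower text).toList.drop i) pat.toList)) with
    | some i => PySem.Str.slice text none (some (i : Int))
    | none => text

-- ===== PRECONDITION & SPEC =====
def Spec_cut_at_rail_py (text : String) (out : String) : Prop := out = cut_at_rail_py_alt text
instance (text : String) (out : String) : Decidable (Spec_cut_at_rail_py text out) := by unfold Spec_cut_at_rail_py; infer_instance

-- ===== CLAIM (what is proved, stated in full; the proofs are below) =====
def Claim_equal_cut_at_rail_py : Prop := ∀ (text : String), Dom_cut_at_rail_py text → Spec_cut_at_rail_py text (cut_at_rail_py text)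

-- ===== LEMMAS AND PROOFS =====

theorem pvStep_some_spec (low : String) (acc : Option Int) (p : String) (c' : Int)
    (h : pvStep low acc p = some c') :
    (acc = some c' ∨ (PySem.Str.find low p = c' ∧ c' ≠ -1))
    ∧ (∀ c, acc = some c → c' ≤ c)
    ∧ (PySem.Str.find low p ≠ -1 → c' ≤ PySem.Str.find low p) := by
  simp only [pvStep] at h
  by_cases hf : PySem.Str.find low p = -1
  · rw [if_pos hf] at h
    refine ⟨Or.inl h, ?_, fun hne => absurd hf hne⟩
    intro c hc; rw [hc] at h; simp only [Option.some.injEq] at h; omega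
  · rw [if_neg hf] at h
    cases acc with
    | none =>
      simp only [Option.some.injEq] at h
      exact ⟨Or.inr ⟨h, by omega⟩, by intro c hc; simp at hc, by intro _; omega⟩
    | some c =>
      have h' : (if PySem.Str.find low p < c then some (PySem.Str.find low p) else some c)
          = some c' := h
      clear h
      split_ifs at h' with hlt <;> simp only [Option.some.injEq] at h'
      · exact ⟨Or.inr ⟨h', by omega⟩, by intro d hd; simp only [Option.some.injEq] at hd; omega,
          by intro _; omega⟩
      · exact ⟨Or.inl (by rw [h']), by intro d hd; simp only [Option.some.injEq] at hd; omega,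
          by intro _; omega⟩

theorem pvStep_none (low : String) (acc : Option Int) (p : String)
    (h : pvStep low acc p = none) : acc = none ∧ PySem.Str.find low p = -1 := by
  simp only [pvStep] at h
  by_cases hf : PySem.Str.find low p = -1
  · rw [if_pos hf] at h; exact ⟨h, hf⟩
  · rw [if_neg hf] at h
    cases acc with
    | none => simp at h
    | some c =>
      have h' : (if PySem.Str.find low p < c then some (PySem.Str.find low p) else some c)
          = none := h
      split_ifs at h'

theorem foldl_step_none (low : String) (H : List String) : ∀ acc : Option Int,
    H.foldl (pvStep low) acc = none →
    acc = none ∧ ∀ p ∈ H, PySem.Str.find low p = -1 := by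
  induction H with
  | nil => intro acc h; simpa using h
  | cons p rest ih =>
    intro acc h
    rw [List.foldl_cons] at h
    obtain ⟨hstep, hrest⟩ := ih (pvStep low acc p) h
    obtain ⟨hacc, hp⟩ := pvStep_none low acc p hstep
    refine ⟨hacc, ?_⟩
    intro q hq
    rcases List.mem_cons.mp hq with hq | hq
    · rwa [hq]
    · exact hrest q hq

theorem foldl_step_some (low : String) (H : List String) : ∀ (acc : Option Int) (m : Int),
    H.foldl (pvStep low) acc = some m →
    (acc = some m ∨ ∃ p ∈ H, PySem.Str.find low p = m ∧ m ≠ -1)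
    ∧ (∀ c, acc = some c → m ≤ c)
    ∧ (∀ p ∈ H, PySem.Str.find low p ≠ -1 → m ≤ PySem.Str.find low p) := by
  induction H with
  | nil =>
    intro acc m h
    simp only [List.foldl_nil] at h
    exact ⟨Or.inl h, by intro c hc; rw [h] at hc; simp only [Option.some.injEq] at hc; omega,
      by simp⟩
  | cons p rest ih =>
    intro acc m h
    rw [List.foldl_cons] at h
    obtain ⟨horig, hle, hrest⟩ := ih (pvStep low acc p) m h
    cases hstep : pvStep low acc p with
    | none =>
      rw [hstep] at horig hle
      rcases horig with horig | horig
      · simp at horig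
      · obtain ⟨hacc, hf⟩ := pvStep_none low acc p hstep
        refine ⟨Or.inr ?_, ?_, ?_⟩
        · obtain ⟨q, hq, hfq⟩ := horig; exact ⟨q, List.mem_cons_of_mem _ hq, hfq⟩
        · intro c hc; rw [hacc] at hc; simp at hc
        · intro q hq hqne
          rcases List.mem_cons.mp hq with hq | hq
          · subst hq; exact absurd hf hqne
          · exact hrest q hq hqne
    | some c' =>
      obtain ⟨sorig, sle, sfp⟩ := pvStep_some_spec low acc p c' hstep
      have hmc' : m ≤ c' := hle c' hstep
      refine ⟨?_, ?_, ?_⟩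
      · rcases horig with horig | horig
        · rw [hstep] at horig; simp at horig; subst horig
          rcases sorig with sorig | sorig
          · exact Or.inl sorig
          · exact Or.inr ⟨p, List.mem_cons_self, sorig⟩
        · obtain ⟨q, hq, hfq⟩ := horig
          exact Or.inr ⟨q, List.mem_cons_of_mem _ hq, hfq⟩
      · intro c hc; exact le_trans hmc' (sle c hc)
      · intro q hq hqne
        rcases List.mem_cons.mp hq with hq | hq
        · subst hq; exact le_trans hmc' (sfp hqne)
        · exact hrest q hq hqne

theorem pv_find?_range_eq_some (q : Nat → Bool) (m : Nat) (hq : q m = true)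
    (hmin : ∀ j < m, q j = false) : ∀ n, m < n → (List.range n).find? q = some m := by
  intro n
  induction n with
  | zero => intro h; omega
  | succ n ih =>
    intro hm
    rw [List.range_succ, List.find?_append]
    by_cases h : m < n
    · rw [ih h]; rfl
    · have hm' : m = n := by omega
      subst hm'
      have hnone : (List.range m).find? q = none := by
        rw [List.find?_eq_none]
        intro x hx
        simp only [List.mem_range] at hx
        simp [hmin x hx]
      rw [hnone]
      simp [hq]

theorem pvHeaders_ne_nil : ∀ p ∈ pvHeaders, p.toList ≠ [] := by decide

-- ===== VERDICT (by name: the statement is the Claim_ definition above) =====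
theorem cut_at_rail_py_spec : Claim_equal_cut_at_rail_py := by
  intro text _
  unfold Spec_cut_at_rail_py
  by_cases htext : text = ""
  · simp [cut_at_rail_py, cut_at_rail_py_alt, htext]
  · set L : List Char := (PySem.Str.lower text).toList with hL
    set q : Nat → Bool := fun i => pvHeaders.any
        (fun pat => PySem.Chars.startswith (L.drop i) pat.toList) with hqdef
    cases hcut : pvHeaders.foldl (pvStep (PySem.Str.lower text)) none with
    | none =>
      -- no pattern occurs anywhere: both return text
      obtain ⟨-, hall⟩ := foldl_step_none (PySem.Str.lower text) pvHeaders none hcut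
      have hqnone : ∀ i, q i = false := by
        intro i
        rw [hqdef]
        simp only [List.any_eq_false]
        intro pat hpat
        have h1 : PySem.Chars.find L pat.toList = -1 := by
          have := hall pat hpat
          rwa [PySem.Str.find_eq] at this
        have h2 : ¬ pat.toList <:+: L := (PySem.Chars.find_eq_neg_one_iff L pat.toList).mp h1
        have h3 : ¬ ∃ j, pat.toList <+: L.drop j := by
          rw [PySem.Chars.exists_prefix_drop_iff_isIn, PySem.Chars.isIn_iff_infix]
          exact h2
        simp only [Bool.not_eq_true]
        rw [← Bool.not_eq_true, PySem.Chars.startswith_iff]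
        exact fun hp => h3 ⟨i, hp⟩
      have hfnone : (List.range ((PySem.Str.lower text).toList.length)).find? q = none := by
        rw [List.find?_eq_none]
        intro x _
        simp [hqnone x]
      rw [← hL] at hfnone
      simp only [cut_at_rail_py, cut_at_rail_py_alt, if_neg htext, hcut, ← hL, ← hqdef, hfnone]
    | some m =>
      obtain ⟨horig, -, hmin⟩ := foldl_step_some (PySem.Str.lower text) pvHeaders none m hcut
      rcases horig with horig | ⟨p, hp, hfp, hmne⟩
      · simp at horig
      have hfpL : PySem.Chars.find L p.toList = m := by
        rw [← PySem.Str.find_eq]; exact hfp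
      have hm0 : 0 ≤ m := by
        have := PySem.Chars.neg_one_le_find L p.toList
        omega
      obtain ⟨hpref, hfirst⟩ := PySem.Chars.find_spec (s := L) (sub := p.toList) (by omega)
      rw [hfpL] at hpref hfirst
      -- q holds at m.toNat
      have hqm : q m.toNat = true := by
        rw [hqdef]
        simp only [List.any_eq_true]
        exact ⟨p, hp, (PySem.Chars.startswith_iff _ _).mpr hpref⟩
      -- q fails before m.toNat
      have hqlt : ∀ j < m.toNat, q j = false := by
        intro j hj
        rw [hqdef]
        simp only [List.any_eq_false]
        intro pat hpat
        simp only [Bool.not_eq_true]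
        rw [← Bool.not_eq_true, PySem.Chars.startswith_iff]
        by_cases hne : PySem.Str.find (PySem.Str.lower text) pat = -1
        · have h2 : ¬ pat.toList <:+: L := by
            rw [← PySem.Chars.find_eq_neg_one_iff, ← PySem.Str.find_eq]; exact hne
          intro hpfx
          have hin : PySem.Chars.isIn pat.toList L = true :=
            (PySem.Chars.exists_prefix_drop_iff_isIn pat.toList L).mp ⟨j, hpfx⟩
          exact h2 ((PySem.Chars.isIn_iff_infix pat.toList L).mp hin)
        · have hmle : m ≤ PySem.Str.find (PySem.Str.lower text) pat := hmin pat hpat hne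
          have hfpatL : PySem.Chars.find L pat.toList =
              PySem.Str.find (PySem.Str.lower text) pat := (PySem.Str.find_eq _ _).symm
          have h0pat : 0 ≤ PySem.Chars.find L pat.toList := by rw [hfpatL]; omega
          obtain ⟨-, hfirst'⟩ := PySem.Chars.find_spec (s := L) (sub := pat.toList) h0pat
          apply hfirst'
          rw [hfpatL]
          omega
      -- m.toNat is inside range(len L)
      have hlen : m.toNat < L.length := by
        have hne := pvHeaders_ne_nil p hp
        obtain ⟨t, ht⟩ := hpref
        have : L.drop m.toNat ≠ [] := by
          intro hnil; rw [hnil] at ht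
          cases pt : p.toList with
          | nil => exact hne pt
          | cons a as => rw [pt] at ht; simp at ht
        by_contra hge
        push Not at hge
        rw [List.drop_eq_nil_iff.mpr (by omega)] at this
        exact this rfl
      have hfind : (List.range ((PySem.Str.lower text).toList.length)).find? q = some m.toNat := by
        exact pv_find?_range_eq_some q m.toNat hqm hqlt _ hlen
      have hmcast : ((m.toNat : Nat) : Int) = m := Int.toNat_of_nonneg hm0
      rw [← hL] at hfind
      simp only [cut_at_rail_py, cut_at_rail_py_alt, if_neg htext, hcut, ← hL, ← hqdef, hfind,
        hmcast]
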